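-- pv_equiv track=rewrite | github.com/c0decave/axross | ui/file_pane.py | _sanitize_clipboard_text
-- ===== SOURCE A (Python) =====
-- def _sanitize_clipboard_text(text: str) -> tuple[str, bool]:
--     """Escape control characters that would turn a clipboard payload
--     into a shell-injection primitive when pasted into a terminal.
--
--     Remote filesystems can expose files with newlines in their names
--     (deliberate on most POSIX backends). If the user selects such a
--     file and copies its path to the clipboard, a later paste into a
--     shell promptly runs whatever came after the newline. We escape
--     ``\\n`` / ``\\r`` / ``\\t`` / NUL to backslash-escapes so the
--     clipboard stays a single visible line and the next paste is
--     obviously-weird rather than silently-dangerous.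
--
--     Returns ``(sanitized, had_control_chars)``.
--     """
--     translations = {
--         "\n": "\\n",
--         "\r": "\\r",
--         "\t": "\\t",
--         "\x00": "\\x00",
--     }
--     had_any = any(ch in text for ch in translations)
--     if not had_any:
--         return text, False
--     out = text
--     for raw, escaped in translations.items():
--         out = out.replace(raw, escaped)
--     return out, True
-- ===== SOURCE B (Python) =====
-- def _sanitize_clipboard_text(text: str) -> tuple[str, bool]:
--     """Single pass: escape \n \r \t NUL and record whether any were seen."""
--     out = []
--     had_any = False
--     for ch in text:
--         if ch == "\n":
--             out.append("\\n")
--             had_any = True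
--         elif ch == "\r":
--             out.append("\\r")
--             had_any = True
--         elif ch == "\t":
--             out.append("\\t")
--             had_any = True
--         elif ch == "\x00":
--             out.append("\\x00")
--             had_any = True
--         else:
--             out.append(ch)
--     return "".join(out), had_any
-- ===== Notes on version B (the rewrite author's own statement) =====
-- stated objective: alternative
-- what changed: Replaces A's membership scan plus four sequential global replace passes with one traversal that both detects control characters and builds the escaped output.
import Mathlib
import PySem

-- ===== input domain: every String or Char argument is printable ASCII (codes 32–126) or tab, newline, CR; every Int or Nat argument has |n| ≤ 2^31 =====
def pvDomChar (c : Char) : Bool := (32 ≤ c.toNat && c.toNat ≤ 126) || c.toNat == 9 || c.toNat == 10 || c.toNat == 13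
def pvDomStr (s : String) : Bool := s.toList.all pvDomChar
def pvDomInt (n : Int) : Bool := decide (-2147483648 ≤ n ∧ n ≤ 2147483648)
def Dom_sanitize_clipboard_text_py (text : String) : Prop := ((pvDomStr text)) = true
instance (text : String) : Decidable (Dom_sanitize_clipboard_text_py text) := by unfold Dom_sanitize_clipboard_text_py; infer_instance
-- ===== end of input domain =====

-- B replaces A's membership scan plus four sequential global replace passes
-- with one traversal that both detects and escapes the control characters (alternative decomposition).


-- ===== PORT A =====
-- had_any = any(ch in text for ch in translations); if not: return (text, False);
-- else four sequential .replace passes in dict-key order, then (out, True)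
def sanitize_clipboard_text_py (text : String) : String × Bool :=
  let had_any := PySem.Str.isIn "\n" text || PySem.Str.isIn "\r" text
      || PySem.Str.isIn "\t" text || PySem.Str.isIn "\x00" text
  if had_any = false then (text, false)
  else
    let out := text
    let out := PySem.Str.replace out "\n" "\\n"
    let out := PySem.Str.replace out "\r" "\\r"
    let out := PySem.Str.replace out "\t" "\\t"
    let out := PySem.Str.replace out "\x00" "\\x00"
    (out, true)

-- ===== PORT B =====
-- single pass: accumulate output chars and a had_any flag
def sanitize_clipboard_text_py_alt (text : String) : String × Bool :=
  let r := text.toList.foldl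
    (fun (acc : List Char × Bool) ch =>
      if ch = '\n' then (acc.1 ++ ['\\', 'n'], true)
      else if ch = '\r' then (acc.1 ++ ['\\', 'r'], true)
      else if ch = '\t' then (acc.1 ++ ['\\', 't'], true)
      else if ch = '\x00' then (acc.1 ++ ['\\', 'x', '0', '0'], true)
      else (acc.1 ++ [ch], acc.2))
    ([], false)
  (String.ofList r.1, r.2)

-- ===== PRECONDITION & SPEC =====
def Spec_sanitize_clipboard_text_py (text : String) (out : String × Bool) : Prop := out = sanitize_clipboard_text_py_alt text
instance (text : String) (out : String × Bool) : Decidable (Spec_sanitize_clipboard_text_py text out) := by unfold Spec_sanitize_clipboard_text_py; infer_instance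

-- ===== CLAIM (what is proved, stated in full; the proofs are below) =====
def Claim_equal_sanitize_clipboard_text_py : Prop := ∀ (text : String), Dom_sanitize_clipboard_text_py text → Spec_sanitize_clipboard_text_py text (sanitize_clipboard_text_py text)

-- ===== LEMMAS AND PROOFS =====

-- per-char escape, the composition of A's four passes and the per-char action of B
def pvEsc (c : Char) : List Char :=
  if c = '\n' then ['\\', 'n']
  else if c = '\r' then ['\\', 'r']
  else if c = '\t' then ['\\', 't']
  else if c = '\x00' then ['\\', 'x', '0', '0']
  else [c]

def pvCtl (c : Char) : Bool := c = '\n' || c = '\r' || c = '\t' || c = '\x00'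

-- replace with a single-char pattern is a per-char flatMap
theorem replace_go_single (a : Char) (nw : List Char) :
    ∀ (l : List Char) (fuel : Nat) (acc : List Char), l.length ≤ fuel →
    PySem.Chars.replace.go [a] nw fuel l acc
      = acc.reverse ++ l.flatMap (fun c => if c = a then nw else [c]) := by
  intro l
  induction l with
  | nil =>
    intro fuel acc _
    cases fuel <;> simp [PySem.Chars.replace.go]
  | cons c t ih =>
    intro fuel acc h
    cases fuel with
    | zero => simp at h
    | succ n =>
      rw [PySem.Chars.replace.go]
      by_cases hc : c = a
      · subst hc
        simp only [List.isPrefixOf, BEq.rfl, Bool.and_self, if_true, List.length_singleton, List.drop_succ_cons, List.drop_zero]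
        rw [ih n (nw.reverse ++ acc) (by simpa using h)]
        simp
      · have : ([a].isPrefixOf (c :: t)) = false := by
          simp [List.isPrefixOf]
          exact fun hh => absurd hh.symm hc
        rw [this]
        simp only [Bool.false_eq_true, if_false]
        rw [ih n (c :: acc) (by simpa using h)]
        simp [hc]

theorem replace_single (a : Char) (nw l : List Char) :
    PySem.Chars.replace l [a] nw = l.flatMap (fun c => if c = a then nw else [c]) := by
  rw [PySem.Chars.replace]
  simp only [List.isEmpty_cons, Bool.false_eq_true, if_false]
  exact replace_go_single a nw l l.length [] (le_refl _)

-- B's fold computed in closed form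
theorem alt_foldl (l : List Char) (o : List Char) (b : Bool) :
    l.foldl
      (fun (acc : List Char × Bool) ch =>
        if ch = '\n' then (acc.1 ++ ['\\', 'n'], true)
        else if ch = '\r' then (acc.1 ++ ['\\', 'r'], true)
        else if ch = '\t' then (acc.1 ++ ['\\', 't'], true)
        else if ch = '\x00' then (acc.1 ++ ['\\', 'x', '0', '0'], true)
        else (acc.1 ++ [ch], acc.2))
      (o, b)
      = (o ++ l.flatMap pvEsc, b || l.any pvCtl) := by
  induction l generalizing o b with
  | nil => simp
  | cons c t ih =>
    simp only [List.foldl_cons, List.flatMap_cons, List.any_cons]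
    by_cases h1 : c = '\n'
    · subst h1; rw [ih]; simp [pvEsc, pvCtl]
    · by_cases h2 : c = '\r'
      · subst h2; rw [ih]; simp [pvEsc, pvCtl]
      · by_cases h3 : c = '\t'
        · subst h3; rw [ih]; simp [pvEsc, pvCtl]
        · by_cases h4 : c = '\x00'
          · subst h4; rw [ih]; simp [pvEsc, pvCtl]
          · simp only [h1, h2, h3, h4, if_false]
            rw [ih]
            simp [pvEsc, pvCtl, h1, h2, h3, h4]

-- A's four chained single-char replaces are the per-char flatMap pvEsc
theorem chain_eq_flatMap (l : List Char) :
    (((l.flatMap (fun c => if c = '\n' then ['\\', 'n'] else [c])).flatMap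
        (fun c => if c = '\r' then ['\\', 'r'] else [c])).flatMap
        (fun c => if c = '\t' then ['\\', 't'] else [c])).flatMap
        (fun c => if c = '\x00' then ['\\', 'x', '0', '0'] else [c])
      = l.flatMap pvEsc := by
  simp only [List.flatMap_assoc]
  refine List.flatMap_congr (fun c _ => ?_)
  by_cases h1 : c = '\n'
  · subst h1; decide
  · by_cases h2 : c = '\r'
    · subst h2; decide
    · by_cases h3 : c = '\t'
      · subst h3; decide
      · by_cases h4 : c = '\x00'
        · subst h4; decide
        · simp [pvEsc, h1, h2, h3, h4]

theorem isIn_single (a : Char) (l : List Char) :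
    PySem.Chars.isIn [a] l = l.any (· = a) := by
  by_cases h : a ∈ l
  · rw [List.any_eq_true.mpr ⟨a, h, by simp⟩]
    exact (PySem.Chars.isIn_iff_infix _ _).mpr ((List.singleton_infix_iff a l).mpr h)
  · rw [List.any_eq_false.mpr (fun x hx => by simp; rintro rfl; exact h hx)]
    exact (PySem.Chars.isIn_eq_false_iff _ _).mpr (fun hi => h ((List.singleton_infix_iff a l).mp hi))

theorem no_ctl_flatMap (l : List Char) (h : l.any pvCtl = false) :
    l.flatMap pvEsc = l := by
  have : ∀ c ∈ l, pvEsc c = [c] := by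
    intro c hc
    have := (List.any_eq_false.mp h) c hc
    simp [pvCtl] at this
    obtain ⟨⟨⟨h1, h2⟩, h3⟩, h4⟩ := this
    simp [pvEsc, h1, h2, h3, h4]
  calc l.flatMap pvEsc = l.flatMap (fun c => [c]) := List.flatMap_congr this
    _ = l := by simp

theorem any_four (l : List Char) :
    (l.any (· = '\n') || l.any (· = '\r') || l.any (· = '\t') || l.any (· = '\x00'))
      = l.any pvCtl := by
  rw [Bool.eq_iff_iff]
  simp only [Bool.or_eq_true, List.any_eq_true, pvCtl, decide_eq_true_eq]
  aesop

theorem alt_closed (text : String) :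
    sanitize_clipboard_text_py_alt text
      = (String.ofList (text.toList.flatMap pvEsc), text.toList.any pvCtl) := by
  unfold sanitize_clipboard_text_py_alt
  rw [alt_foldl]
  simp

-- ===== VERDICT (by name: the statement is the Claim_ definition above) =====
theorem sanitize_clipboard_text_py_spec : Claim_equal_sanitize_clipboard_text_py := by
  intro text _
  unfold Spec_sanitize_clipboard_text_py
  rw [alt_closed]
  unfold sanitize_clipboard_text_py
  simp only [PySem.Str.isIn_eq, PySem.Str.replace]
  rw [show ("\n" : String).toList = ['\n'] from rfl,
      show ("\r" : String).toList = ['\r'] from rfl,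
      show ("\t" : String).toList = ['\t'] from rfl,
      show ("\x00" : String).toList = ['\x00'] from rfl,
      isIn_single, isIn_single, isIn_single, isIn_single, any_four]
  cases h : text.toList.any pvCtl with
  | false =>
    rw [if_pos rfl, no_ctl_flatMap _ h, String.ofList_toList]
  | true =>
    simp only [Bool.true_eq_false, if_false, String.toList_ofList]
    rw [replace_single, String.toList_ofList, replace_single, String.toList_ofList,
        replace_single, String.toList_ofList, replace_single]
    simp only [show ("\\n" : String).toList = ['\\', 'n'] from rfl]
    rw [chain_eq_flatMap]
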